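-- pv_equiv track=rewrite | github.com/daniel880423/Member_System | file/hw2/1100309/s1100309_0.py | homework_2
-- ===== SOURCE A (Python) =====
-- def homework_2(lst): # 請同學記得把檔案名稱改成自己的學號(ex.1104813.py)
--     times = 0
--
--     for i in range(len(lst)):                      #先判斷list裡的數是否為偶數，如果不是則加1變成偶數
--         if (lst[i] % 2 != 0):
--             lst[i] += 1
--             times += 1
--
--     for i in range (1,len(lst)):                   #若下一個數小於或等於上一個數，則加2
--         while(lst[i] <= lst[i-1]):
--             lst[i] += 2
--             times += 2
--
--
--     return  times
-- ===== SOURCE B (Python) =====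
-- def homework_2(lst):
--     # One pass, closed-form arithmetic instead of the while-add-2 loop.
--     # Note: unlike A, this does not mutate lst in place (return value only).
--     times = 0
--     prev = None
--     for x in lst:
--         if x % 2 != 0:
--             x += 1
--             times += 1
--         if prev is not None and x <= prev:
--             k = (prev - x) // 2 + 1
--             x += 2 * k
--             times += 2 * k
--         prev = x
--     return times
-- ===== Notes on version B (the rewrite author's own statement) =====
-- stated objective: faster
-- what changed: Replaced A's two passes with while-add-2 inner loops by a single pass that computes the needed number of +2 increments in closed form ((prev - x)//2 + 1); B also does not mutate the input list.
import Mathlib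
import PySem

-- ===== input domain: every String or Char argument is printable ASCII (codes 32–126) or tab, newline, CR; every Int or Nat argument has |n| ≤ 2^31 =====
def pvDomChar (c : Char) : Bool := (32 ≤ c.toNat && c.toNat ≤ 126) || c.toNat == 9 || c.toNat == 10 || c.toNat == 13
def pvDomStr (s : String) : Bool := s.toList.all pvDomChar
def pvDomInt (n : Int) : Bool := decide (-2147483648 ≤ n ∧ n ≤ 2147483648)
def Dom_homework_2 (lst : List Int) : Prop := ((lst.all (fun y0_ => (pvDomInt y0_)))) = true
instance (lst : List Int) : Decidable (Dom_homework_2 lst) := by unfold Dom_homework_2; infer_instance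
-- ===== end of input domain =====

-- B replaces A's while-add-2 inner loops by one pass with closed-form increment counts (faster);
-- A mutates its argument in place, B does not: the equivalence proved is about the return value only.

-- ===== PORT A =====
-- the inner 'while lst[i] <= lst[i-1]: lst[i] += 2; times += 2' loop
def hwWhile (prev cur times : Int) : Int × Int :=
  if cur ≤ prev then hwWhile prev (cur + 2) (times + 2) else (cur, times)
termination_by (prev + 2 - cur).toNat
decreasing_by omega

-- first for-loop body: evening each element, counting the +1s
def hwStep1 (st : List Int × Int) (x : Int) : List Int × Int :=
  if PySem.Int.mod x 2 ≠ 0 then (st.1 ++ [x + 1], st.2 + 1) else (st.1 ++ [x], st.2)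

-- second for-loop body, index i over range(1, len(lst))
def hwStep2 (st : List Int × Int) (i : Int) : List Int × Int :=
  let r := hwWhile (PySem.List.pyGetD st.1 (i - 1) 0) (PySem.List.pyGetD st.1 i 0) st.2
  (PySem.List.pySetD st.1 i r.1, r.2)

def homework_2 (lst : List Int) : Int :=
  let p1 := lst.foldl hwStep1 ([], 0)
  let p2 := (PySem.List.pyRange 1 (p1.1.length : Int) 1).foldl hwStep2 p1
  p2.2

-- ===== PORT B =====
-- single-pass body: even the element, then add the closed-form number of +2s
def hwStepB (st : Int × Option Int) (x : Int) : Int × Option Int :=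
  let y := if PySem.Int.mod x 2 ≠ 0 then x + 1 else x
  let t := if PySem.Int.mod x 2 ≠ 0 then st.1 + 1 else st.1
  match st.2 with
  | none => (t, some y)
  | some p =>
    if y ≤ p then
      let k := PySem.Int.floordiv (p - y) 2 + 1
      (t + 2 * k, some (y + 2 * k))
    else (t, some y)

def homework_2_alt (lst : List Int) : Int :=
  (lst.foldl hwStepB (0, none)).1

-- ===== PRECONDITION & SPEC =====
def Spec_homework_2 (lst : List Int) (out : Int) : Prop := out = homework_2_alt lst
instance (lst : List Int) (out : Int) : Decidable (Spec_homework_2 lst out) := by unfold Spec_homework_2; infer_instance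

-- ===== CLAIM (what is proved, stated in full; the proofs are below) =====
def Claim_equal_homework_2 : Prop := ∀ (lst : List Int), Dom_homework_2 lst → Spec_homework_2 lst (homework_2 lst)

-- ===== LEMMAS AND PROOFS =====

-- value and count contributed by the evening pass
def hwF (x : Int) : Int := if PySem.Int.mod x 2 ≠ 0 then x + 1 else x
def hwC (x : Int) : Int := if PySem.Int.mod x 2 ≠ 0 then 1 else 0

-- abstract form of A's second pass: fold carrying the previous (already fixed) value
def hwChain (p t : Int) : List Int → Int
  | [] => t
  | x :: xs => hwChain (hwWhile p x t).1 (hwWhile p x t).2 xs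

lemma hwWhile_closed (n : Nat) : ∀ (p x t : Int), (p + 2 - x).toNat ≤ n →
    hwWhile p x t = if x ≤ p then (x + 2 * ((p - x) / 2 + 1), t + 2 * ((p - x) / 2 + 1)) else (x, t) := by
  induction n with
  | zero =>
    intro p x t h
    rw [hwWhile]
    have : ¬ x ≤ p := by omega
    simp [this]
  | succ n ih =>
    intro p x t h
    rw [hwWhile]
    split_ifs with hle
    · rw [ih p (x + 2) (t + 2) (by omega)]
      split_ifs with h2
      · refine Prod.ext ?_ ?_ <;> simp <;> omega
      · refine Prod.ext ?_ ?_ <;> simp <;> omega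
    · rfl

lemma hwWhile_eq (p x t : Int) :
    hwWhile p x t = if x ≤ p then (x + 2 * ((p - x) / 2 + 1), t + 2 * ((p - x) / 2 + 1)) else (x, t) :=
  hwWhile_closed (p + 2 - x).toNat p x t le_rfl

lemma pass1_eq : ∀ (lst : List Int) (acc : List Int) (t : Int),
    lst.foldl hwStep1 (acc, t) = (acc ++ lst.map hwF, t + (lst.map hwC).sum) := by
  intro lst
  induction lst with
  | nil => intro acc t; simp
  | cons x xs ih =>
    intro acc t
    simp only [List.foldl_cons, hwStep1, List.map_cons, List.sum_cons]
    split_ifs with h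
    · rw [ih]
      simp only [hwF, hwC, if_pos h, Prod.mk.injEq]
      exact ⟨by simp, by omega⟩
    · rw [ih]
      simp only [hwF, hwC, if_neg h, Prod.mk.injEq]
      exact ⟨by simp, by omega⟩

lemma pass2_eq : ∀ (rest pre : List Int) (v t : Int),
    ((PySem.List.pyRange ((pre.length : Int) + 1) ((pre.length : Int) + 1 + rest.length) 1).foldl
      hwStep2 (pre ++ v :: rest, t)).2 = hwChain v t rest := by
  intro rest
  induction rest with
  | nil =>
    intro pre v t
    simp only [List.length_nil, Nat.cast_zero, add_zero]
    have h0 : PySem.List.pyRange ((pre.length : Int) + 1) ((pre.length : Int) + 1) 1 = [] := by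
      simp [PySem.List.pyRange]
    rw [h0]
    rfl
  | cons x rest ih =>
    intro pre v t
    have hcons : PySem.List.pyRange ((pre.length : Int) + 1) ((pre.length : Int) + 1 + (x :: rest).length) 1
        = ((pre.length : Int) + 1) :: PySem.List.pyRange ((pre.length : Int) + 1 + 1) ((pre.length : Int) + 1 + (x :: rest).length) 1 := by
      apply PySem.List.pyRange_one_cons
      simp only [List.length_cons]
      push_cast
      omega
    rw [hcons, List.foldl_cons]
    have hgetprev : PySem.List.pyGetD (pre ++ v :: x :: rest) ((pre.length : Int) + 1 - 1) 0 = v := by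
      simp only [add_sub_cancel_right, PySem.List.pyGetD_natCast]
      simp
    have hgetcur : PySem.List.pyGetD (pre ++ v :: x :: rest) ((pre.length : Int) + 1) 0 = x := by
      have : ((pre.length : Int) + 1) = (((pre ++ [v]).length : Nat) : Int) := by simp
      rw [this, PySem.List.pyGetD_natCast]
      have : pre ++ v :: x :: rest = (pre ++ [v]) ++ x :: rest := by simp
      rw [this]
      simp
    have hset : PySem.List.pySetD (pre ++ v :: x :: rest) ((pre.length : Int) + 1)
        (hwWhile v x t).1 = (pre ++ [v]) ++ (hwWhile v x t).1 :: rest := by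
      have h1 : ((pre.length : Int) + 1) = (((pre ++ [v]).length : Nat) : Int) := by simp
      rw [h1, PySem.List.pySetD_natCast]
      have h2 : pre ++ v :: x :: rest = (pre ++ [v]) ++ x :: rest := by simp
      rw [h2, List.set_append_right _ _ (le_refl _)]
      simp
    show ((PySem.List.pyRange _ _ 1).foldl hwStep2 (hwStep2 (pre ++ v :: x :: rest, t) ((pre.length : Int) + 1))).2 = _
    rw [hwStep2]
    simp only [hgetprev, hgetcur, hset]
    have harg : ((pre.length : Int) + 1 + 1) = (((pre ++ [v]).length : Int) + 1) := by simp
    have harg2 : ((pre.length : Int) + 1 + (x :: rest).length) = (((pre ++ [v]).length : Int) + 1 + rest.length) := by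
      simp; omega
    rw [harg, harg2, ih (pre ++ [v]) (hwWhile v x t).1 (hwWhile v x t).2]
    rfl

lemma bfold_eq : ∀ (xs : List Int) (t p : Int),
    (xs.foldl hwStepB (t, some p)).1 = hwChain p (t + (xs.map hwC).sum) (xs.map hwF) := by
  intro xs
  induction xs with
  | nil => intro t p; simp [hwChain]
  | cons x xs ih =>
    intro t p
    simp only [List.foldl_cons, List.map_cons, List.sum_cons, hwChain]
    rw [hwWhile_eq]
    simp only [hwStepB, hwF, hwC]
    split_ifs with hodd hle hle
    · rw [PySem.Int.floordiv_eq_ediv_of_pos (by omega)]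
      rw [ih]
      congr 1
      omega
    · rw [ih]
      congr 1
      omega
    · rw [PySem.Int.floordiv_eq_ediv_of_pos (by omega)]
      rw [ih]
      congr 1
      omega
    · rw [ih]
      congr 1
      omega

-- ===== VERDICT (by name: the statement is the Claim_ definition above) =====
theorem homework_2_spec : Claim_equal_homework_2 := by
  intro lst _
  unfold Spec_homework_2 homework_2 homework_2_alt
  cases lst with
  | nil => simp [PySem.List.pyRange]
  | cons a xs =>
    simp only []
    rw [pass1_eq]
    simp only [List.nil_append, List.map_cons, List.sum_cons, List.foldl_cons]
    have hB : hwStepB (0, none) a = (hwC a, some (hwF a)) := by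
      simp [hwStepB, hwF, hwC]
    rw [hB, bfold_eq]
    have hlen : (((hwF a :: xs.map hwF).length : Nat) : Int) = ((([] : List Int).length : Int) + 1 + (xs.map hwF).length) := by
      simp only [List.length_cons, List.length_nil]
      push_cast
      ring
    rw [hlen]
    have := pass2_eq (xs.map hwF) [] (hwF a) (0 + (hwC a + (xs.map hwC).sum))
    simp only [List.nil_append, List.length_nil, Nat.cast_zero, zero_add] at this ⊢
    rw [this]
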